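-- pv_equiv track=rewrite | github.com/kimgyuhee/Python | Chapter0_Algorithm/2306/230602/test02.py | solution
-- ===== SOURCE A (Python) =====
-- def solution(n, left, right):
--     answer = [[i+1 for i in range(n)]]
--     result = []
--     num = 0
--     for i in range(n) :
--         value = answer[i]
--         for n in range(num) :
--             value[n] +=1
--         result +=value
--         num+=1
--         answer.append(value)
--     return result[left:right+1]
-- ===== SOURCE B (Python) =====
-- def solution(n, left, right):
--     m = n if n > 0 else 0
--     total = m * m
--
--     def clamp(i):
--         if i < 0:
--             i += total
--         if i < 0:
--             i = 0
--         if i > total: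
--             i = total
--         return i
--
--     lo = clamp(left)
--     hi = clamp(right + 1)
--     return [max(idx // m, idx % m) + 1 for idx in range(lo, hi)]
-- ===== Notes on version B (the rewrite author's own statement) =====
-- stated objective: faster
-- what changed: B replaces A's O(n^2) construction of the whole n*n concatenated list by a per-index closed form max(idx//n, idx%n)+1, computing only the requested slice after normalising the slice bounds with Python's clamping rules.
import Mathlib
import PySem

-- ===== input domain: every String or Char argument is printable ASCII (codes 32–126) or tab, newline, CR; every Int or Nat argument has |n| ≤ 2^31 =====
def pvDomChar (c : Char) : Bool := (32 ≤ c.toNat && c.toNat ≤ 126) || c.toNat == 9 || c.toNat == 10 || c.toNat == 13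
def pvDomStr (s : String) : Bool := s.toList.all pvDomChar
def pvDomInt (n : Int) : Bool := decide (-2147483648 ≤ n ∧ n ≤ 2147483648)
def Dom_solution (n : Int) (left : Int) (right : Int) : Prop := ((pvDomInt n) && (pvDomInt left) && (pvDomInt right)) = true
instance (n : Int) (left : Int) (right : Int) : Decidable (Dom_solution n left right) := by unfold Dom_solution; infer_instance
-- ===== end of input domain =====

-- B computes each requested entry by the closed form max(idx//n, idx%n)+1 instead of
-- building the whole n*n list (objective: faster, asymptotically).

-- ===== PORT A =====
-- In A every list appended to `answer` is the SAME mutable list object as answer[0]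
-- (answer.append(value) aliases), so `value = answer[i]` always reads that one shared
-- list; the port therefore tracks the shared list directly as the state component
-- `value` together with `result` and `num`.  (A mutates only its own local lists.)
def solution (n : Int) (left : Int) (right : Int) : List Int :=
  let value0 : List Int := (PySem.List.pyRange 0 n 1).map (fun i => i + 1)
  let st :=
    (PySem.List.pyRange 0 n 1).foldl
      (fun (st : List Int × List Int × Int) _i =>
        let value :=
          (PySem.List.pyRange 0 st.2.2 1).foldl
            (fun v k => PySem.List.pySetD v k (PySem.List.pyGetD v k 0 + 1)) st.1
        (value, st.2.1 ++ value, st.2.2 + 1))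
      (value0, ([], 0))
  PySem.List.slice st.2.1 (some left) (some (right + 1))

-- ===== PORT B =====
def solution_alt (n : Int) (left : Int) (right : Int) : List Int :=
  let m : Int := if n > 0 then n else 0
  let total : Int := m * m
  let clamp : Int → Int := fun i =>
    let i := if i < 0 then i + total else i
    let i := if i < 0 then 0 else i
    if i > total then total else i
  let lo := clamp left
  let hi := clamp (right + 1)
  (PySem.List.pyRange lo hi 1).map
    (fun idx => max (PySem.Int.floordiv idx m) (PySem.Int.mod idx m) + 1)

-- ===== PRECONDITION & SPEC =====
def Spec_solution (n : Int) (left : Int) (right : Int) (out : List Int) : Prop := out = solution_alt n left right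
instance (n : Int) (left : Int) (right : Int) (out : List Int) : Decidable (Spec_solution n left right out) := by unfold Spec_solution; infer_instance

-- ===== CLAIM (what is proved, stated in full; the proofs are below) =====
def Claim_equal_solution : Prop := ∀ (n : Int) (left : Int) (right : Int), Dom_solution n left right → Spec_solution n left right (solution n left right)

-- ===== LEMMAS AND PROOFS =====

-- row r of the n*n construction: entry p is max r p + 1
def pvRow (n r : Int) : List Int :=
  (PySem.List.pyRange 0 n 1).map (fun p => max r p + 1)

-- setting index j of a map over range 0..n rewrites one point of the function
lemma pv_set_map_pyRange (n : Int) (f : Int → Int) (j : ℕ) (v : Int)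
    (hj : (j : Int) < n) :
    ((PySem.List.pyRange 0 n 1).map f).set j v
      = (PySem.List.pyRange 0 n 1).map (fun p => if p = (j : Int) then v else f p) := by
  apply List.ext_getElem
  · simp
  · intro i h1 h2
    simp only [List.getElem_set, List.getElem_map, PySem.List.getElem_pyRange_one, zero_add]
    simp only [List.length_set, List.length_map, PySem.List.length_pyRange_one] at h1
    by_cases hij : i = j
    · subst hij; simp
    · have : ¬ ((i : Int) = (j : Int)) := by exact_mod_cast hij
      simp only [this, if_false]
      rw [if_neg (fun h => hij h.symm)]

-- the inner `for n in range(num)` loop: increment the first j entries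
lemma pv_incr_fold (n : Int) (f : Int → Int) :
    ∀ (j : ℕ), (j : Int) ≤ n →
      (PySem.List.pyRange 0 (j : Int) 1).foldl
          (fun v k => PySem.List.pySetD v k (PySem.List.pyGetD v k 0 + 1))
          ((PySem.List.pyRange 0 n 1).map f)
        = (PySem.List.pyRange 0 n 1).map (fun p => if p < (j : Int) then f p + 1 else f p) := by
  intro j
  induction j with
  | zero =>
      intro _
      rw [show PySem.List.pyRange (0:Int) ((0:ℕ):Int) 1 = [] from
            PySem.List.pyRange_one_eq_nil (by omega)]
      simp only [List.foldl_nil]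
      apply List.map_congr_left
      intro p hp
      have := (PySem.List.mem_pyRange_one).1 hp
      simp [show ¬ p < (0:Int) by omega]
  | succ j ih =>
      intro hle
      have hle' : (j : Int) + 1 ≤ n := by exact_mod_cast hle
      have hj : (j : Int) ≤ n := by omega
      rw [show (((j+1 : ℕ)) : Int) = (j : Int) + 1 by push_cast; ring,
          PySem.List.pyRange_one_succ_right (by omega), List.foldl_append, ih hj]
      simp only [List.foldl_cons, List.foldl_nil]
      have hget : PySem.List.pyGetD
          ((PySem.List.pyRange 0 n 1).map (fun p => if p < (j : Int) then f p + 1 else f p))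
          (j : Int) 0 = f (j : Int) := by
        rw [PySem.List.pyGetD_map_pyRange_of_nonneg _ _ _ _ (by omega) (by omega)]
        simp
      rw [hget, PySem.List.pySetD_of_nonneg _ _ (by omega : (0:Int) ≤ (j:Int))]
      rw [show ((j:Int)).toNat = j by simp]
      rw [pv_set_map_pyRange n _ j _ (by omega)]
      apply List.map_congr_left
      intro p hp
      have hpmem := (PySem.List.mem_pyRange_one).1 hp
      by_cases h1 : p = (j : Int)
      · simp [h1]
      · have h2 : p < (j:Int) + 1 ↔ p < (j:Int) := by omega
        simp [h1, h2]

-- one iteration of the outer loop sends the shared list from pvRow n (k-1) to pvRow n k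
lemma pv_step_value (n k : Int) (h0 : 0 ≤ k) (hk : k ≤ n) :
    (PySem.List.pyRange 0 k 1).foldl
        (fun v j => PySem.List.pySetD v j (PySem.List.pyGetD v j 0 + 1))
        (pvRow n (k - 1))
      = pvRow n k := by
  obtain ⟨j, rfl⟩ : ∃ j : ℕ, k = (j : Int) := ⟨k.toNat, by omega⟩
  unfold pvRow
  rw [pv_incr_fold n _ j (by omega)]
  apply List.map_congr_left
  intro p hp
  have hpmem := (PySem.List.mem_pyRange_one).1 hp
  by_cases h1 : p < (j : Int)
  · simp only [h1, if_true]; omega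
  · simp only [h1, if_false]; omega

-- the loop invariant of A's outer loop
lemma pv_loop_inv (n : Int) :
    ∀ (l : List Int) (k : Int), 0 ≤ k → k + l.length ≤ n →
      l.foldl
        (fun (st : List Int × List Int × Int) _i =>
          let value :=
            (PySem.List.pyRange 0 st.2.2 1).foldl
              (fun v j => PySem.List.pySetD v j (PySem.List.pyGetD v j 0 + 1)) st.1
          (value, st.2.1 ++ value, st.2.2 + 1))
        (pvRow n (k - 1), (PySem.List.pyRange 0 k 1).flatMap (pvRow n), k)
      = (pvRow n (k + l.length - 1),
         (PySem.List.pyRange 0 (k + l.length) 1).flatMap (pvRow n),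
         k + l.length) := by
  intro l
  induction l with
  | nil => intro k h0 hk; simp
  | cons x xs ih =>
      intro k h0 hk
      simp only [List.length_cons] at hk ⊢
      rw [List.foldl_cons]
      have hstep := pv_step_value n k h0 (by push_cast at hk ⊢; omega)
      simp only [hstep]
      have hrow : (PySem.List.pyRange 0 (k+1) 1).flatMap (pvRow n)
          = (PySem.List.pyRange 0 k 1).flatMap (pvRow n) ++ pvRow n k := by
        rw [PySem.List.pyRange_one_succ_right h0]
        simp
      rw [← hrow]
      have hih := ih (k + 1) (by omega) (by push_cast at hk ⊢; omega)
      rw [show k + 1 - 1 = k by ring] at hih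
      simp only [hih]
      rw [show k + ((xs.length + 1 : ℕ) : Int) = k + 1 + (xs.length : Int) by push_cast; ring]

-- the flattened rows are the closed-form list over range 0..k*n
lemma pv_flat (n : Int) (hn : 0 < n) :
    ∀ (k : ℕ),
      (PySem.List.pyRange 0 (k : Int) 1).flatMap (pvRow n)
        = (PySem.List.pyRange 0 ((k : Int) * n) 1).map
            (fun idx => max (PySem.Int.floordiv idx n) (PySem.Int.mod idx n) + 1) := by
  intro k
  induction k with
  | zero => simp
  | succ k ih =>
      rw [show (((k+1 : ℕ)) : Int) = (k : Int) + 1 by push_cast; ring,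
          PySem.List.pyRange_one_succ_right (by positivity),
          List.flatMap_append, ih]
      have hsplit : PySem.List.pyRange 0 (((k : Int) + 1) * n) 1
          = PySem.List.pyRange 0 ((k : Int) * n) 1
            ++ PySem.List.pyRange ((k : Int) * n) (((k : Int) + 1) * n) 1 := by
        apply PySem.List.pyRange_one_append
        · positivity
        · nlinarith
      rw [hsplit, List.map_append]
      congr 1
      simp only [List.flatMap_cons, List.flatMap_nil, List.append_nil]
      unfold pvRow
      rw [PySem.List.pyRange_one (0 : Int) n, PySem.List.pyRange_one ((k : Int) * n)]
      have hlen : (((k : Int) + 1) * n - (k : Int) * n).toNat = (n - 0).toNat := by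
        congr 1; ring
      rw [hlen]
      simp only [List.map_map]
      apply List.map_congr_left
      intro t ht
      have htlt : (t : Int) < n := by
        have := List.mem_range.1 ht
        omega
      have ht0 : (0 : Int) ≤ (t : Int) := by positivity
      simp only [Function.comp_apply, zero_add]
      have hfd : PySem.Int.floordiv ((k : Int) * n + t) n = (k : Int) := by
        rw [PySem.Int.floordiv_eq_iff_of_pos hn]
        constructor <;> nlinarith
      have hmod : PySem.Int.mod ((k : Int) * n + t) n = (t : Int) := by
        have := PySem.Int.floordiv_mul_add_mod ((k : Int) * n + t) n
        rw [hfd] at this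
        omega
      rw [hfd, hmod]

-- my Python clamp equals PySem's clampIdx (as an Int), for a nonneg length T
lemma pv_clamp_eq (T i : Int) (hT : 0 ≤ T) :
    (if (if (if i < 0 then i + T else i) < 0 then 0 else if i < 0 then i + T else i) > T
       then T
       else (if (if i < 0 then i + T else i) < 0 then 0 else if i < 0 then i + T else i))
      = ((PySem.List.clampIdx T.toNat i : ℕ) : Int) := by
  unfold PySem.List.clampIdx
  split_ifs <;> omega

-- slicing a map over range 0..T with clamped bounds is the map over the clamped range
lemma pv_slice_map (T a b : Int) (_hT : 0 ≤ T) (G : Int → Int) :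
    PySem.List.slice ((PySem.List.pyRange 0 T 1).map G) (some a) (some b)
      = (PySem.List.pyRange ((PySem.List.clampIdx T.toNat a : ℕ) : Int)
                            ((PySem.List.clampIdx T.toNat b : ℕ) : Int) 1).map G := by
  have hlen : ((PySem.List.pyRange 0 T 1).map G).length = T.toNat := by
    simp [PySem.List.length_pyRange_one]
  have hA := PySem.List.clampIdx_le T.toNat a
  have hB := PySem.List.clampIdx_le T.toNat b
  apply List.ext_getElem
  · rw [PySem.List.length_slice, hlen]
    simp only [List.length_map, PySem.List.length_pyRange_one]
    omega
  · intro i h1 h2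
    have h1' : i < PySem.List.clampIdx T.toNat b - PySem.List.clampIdx T.toNat a := by
      rwa [PySem.List.length_slice, hlen] at h1
    simp only [PySem.List.slice, hlen, List.getElem_take, List.getElem_drop,
      List.getElem_map, PySem.List.getElem_pyRange_one, zero_add]
    congr 1

-- ===== VERDICT (by name: the statement is the Claim_ definition above) =====
theorem solution_spec : Claim_equal_solution := by
  intro n left right _
  unfold Spec_solution solution solution_alt
  by_cases hn : n > 0
  · simp only [hn, if_true]
    have hinv := pv_loop_inv n (PySem.List.pyRange 0 n 1) 0 (by omega)
      (by simp [PySem.List.length_pyRange_one]; omega)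
    have hlen : ((PySem.List.pyRange 0 n 1).length : Int) = n := by
      simp [PySem.List.length_pyRange_one]; omega
    have hval0 : (PySem.List.pyRange 0 n 1).map (fun i => i + 1) = pvRow n (0 - 1) := by
      unfold pvRow
      apply List.map_congr_left
      intro p hp
      have := (PySem.List.mem_pyRange_one).1 hp
      omega
    rw [hval0]
    have hk0 : PySem.List.pyRange 0 (0 : Int) 1 = ([] : List Int) :=
      PySem.List.pyRange_one_eq_nil (by omega)
    have hinv' := hinv
    rw [hk0] at hinv'
    simp only [List.flatMap_nil] at hinv'
    rw [hinv']
    simp only [zero_add, hlen]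
    obtain ⟨N, rfl⟩ : ∃ N : ℕ, n = (N : Int) := ⟨n.toNat, by omega⟩
    rw [pv_flat _ hn N]
    rw [pv_slice_map ((N : Int) * (N : Int)) left (right + 1) (by positivity)]
    simp only [← pv_clamp_eq ((N : Int) * (N : Int)) left (by positivity),
               ← pv_clamp_eq ((N : Int) * (N : Int)) (right + 1) (by positivity)]
  · simp only [hn, if_false]
    rw [show PySem.List.pyRange (0:Int) n 1 = [] from PySem.List.pyRange_one_eq_nil (by omega)]
    simp [PySem.List.slice]
    split_ifs <;> exact PySem.List.pyRange_one_eq_nil (by omega)
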